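-- pv_equiv track=rewrite | github.com/lostwangwang/mdt-medical-ai | src/knowledge/dialogue_memory_manager.py | _segment_dialogues_by_time
-- ===== SOURCE A (Python) =====
-- def _segment_dialogues_by_time(dialogues, num_segments=5):
--     """按时间分段对话"""
--     if len(dialogues) < num_segments:
--         return [dialogues]
--
--     segment_size = len(dialogues) // num_segments
--     segments = []
--
--     for i in range(num_segments):
--         start_idx = i * segment_size
--         end_idx = start_idx + segment_size if i < num_segments - 1 else len(dialogues)
--         segments.append(dialogues[start_idx:end_idx])
--
--     return segments
-- ===== SOURCE B (Python) =====
-- def _segment_dialogues_by_time(dialogues, num_segments=5):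
--     """按时间分段对话"""
--     if len(dialogues) < num_segments:
--         return [dialogues]
--
--     segment_size = len(dialogues) // num_segments
--     segments = [[] for _ in range(num_segments)]
--     for j, d in enumerate(dialogues):
--         segments[min(j // segment_size, num_segments - 1)].append(d)
--     return segments
-- ===== Notes on version B (the rewrite author's own statement) =====
-- stated objective: alternative
-- what changed: B replaces A's per-segment index-arithmetic slicing (start/end indices recomputed per segment) by a single element-wise pass that distributes each dialogue into one of num_segments pre-created buckets via min(j // segment_size, num_segments - 1).
-- outside the precondition, e.g. on _segment_dialogues_by_time(['a', 'b'], -1): A returns [], B raises IndexError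
import Mathlib
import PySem

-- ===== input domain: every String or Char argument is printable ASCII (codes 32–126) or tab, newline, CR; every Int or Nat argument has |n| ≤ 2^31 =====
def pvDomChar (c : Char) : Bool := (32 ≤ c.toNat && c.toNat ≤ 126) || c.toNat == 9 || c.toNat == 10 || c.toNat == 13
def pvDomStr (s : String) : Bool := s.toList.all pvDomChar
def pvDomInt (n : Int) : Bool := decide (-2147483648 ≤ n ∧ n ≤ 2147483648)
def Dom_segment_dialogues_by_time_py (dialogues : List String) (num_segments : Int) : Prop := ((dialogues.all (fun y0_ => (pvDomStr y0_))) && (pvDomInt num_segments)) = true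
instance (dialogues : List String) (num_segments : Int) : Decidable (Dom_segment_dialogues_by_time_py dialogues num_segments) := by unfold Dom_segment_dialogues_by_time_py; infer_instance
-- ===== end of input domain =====

-- B replaces A's per-segment index-arithmetic slicing by a single element-wise pass
-- distributing each dialogue into one of num_segments pre-created buckets (objective: alternative).

-- ===== PORT A =====
def segment_dialogues_by_time_py (dialogues : List String) (num_segments : Int) : List (List String) :=
  if (dialogues.length : Int) < num_segments then [dialogues]
  else
    let segment_size := PySem.Int.floordiv (dialogues.length : Int) num_segments
    (PySem.List.pyRange 0 num_segments 1).foldl (fun segments i =>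
      let start_idx := i * segment_size
      let end_idx := if i < num_segments - 1 then start_idx + segment_size else (dialogues.length : Int)
      segments ++ [PySem.List.slice dialogues (some start_idx) (some end_idx)]) []

-- ===== PORT B =====
-- segments[i].append(d): exact for indices Python accepts (incl. negative wraparound);
-- where Python would raise IndexError (unreachable inside Pre_) it is a no-op.
def pvBucketApp (segs : List (List String)) (i : Int) (d : String) : List (List String) :=
  let j := if i < 0 then i + segs.length else i
  if 0 ≤ j ∧ j < segs.length then segs.modify j.toNat (fun s => s ++ [d]) else segs

def segment_dialogues_by_time_py_alt (dialogues : List String) (num_segments : Int) : List (List String) :=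
  if (dialogues.length : Int) < num_segments then [dialogues]
  else
    let segment_size := PySem.Int.floordiv (dialogues.length : Int) num_segments
    let init := (PySem.List.pyRange 0 num_segments 1).map (fun _ => ([] : List String))
    (PySem.List.enumerate dialogues 0).foldl (fun segs jd =>
      pvBucketApp segs (min (PySem.Int.floordiv jd.1 segment_size) (num_segments - 1)) jd.2) init

-- ===== PRECONDITION & SPEC =====
-- Pre_ excludes num_segments ≤ 0: at 0 A raises ZeroDivisionError, and for negative
-- num_segments A's empty range(...) accidentally returns [] while B's bucket indexing raises IndexError.
def Pre_segment_dialogues_by_time_py (dialogues : List String) (num_segments : Int) : Prop :=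
  1 ≤ num_segments

instance (dialogues : List String) (num_segments : Int) : Decidable (Pre_segment_dialogues_by_time_py dialogues num_segments) := by unfold Pre_segment_dialogues_by_time_py; infer_instance

def pvWitness_segment_dialogues_by_time_py : List String × Int := (["a", "b", "c"], 2)

def Spec_segment_dialogues_by_time_py (dialogues : List String) (num_segments : Int) (out : List (List String)) : Prop := out = segment_dialogues_by_time_py_alt dialogues num_segments
instance (dialogues : List String) (num_segments : Int) (out : List (List String)) : Decidable (Spec_segment_dialogues_by_time_py dialogues num_segments out) := by unfold Spec_segment_dialogues_by_time_py; infer_instance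

-- ===== CLAIM (what is proved, stated in full; the proofs are below) =====
def Claim_equal_segment_dialogues_by_time_py : Prop := ∀ (dialogues : List String) (num_segments : Int), Dom_segment_dialogues_by_time_py dialogues num_segments → Pre_segment_dialogues_by_time_py dialogues num_segments → Spec_segment_dialogues_by_time_py dialogues num_segments (segment_dialogues_by_time_py dialogues num_segments)

-- ===== LEMMAS AND PROOFS =====

-- the common segment description: segment k of L, for segment size S among N segments
def pvSeg (L : List String) (N S : Nat) (k : Nat) : List String :=
  (L.drop (k * S)).take (if k < N - 1 then S else L.length - k * S)

-- the B-side loop invariant: bucket i after the first m dialogues have been distributed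
def pvG (L : List String) (N S : Nat) (m : Nat) (i : Nat) : List String :=
  (L.take (min m (if i < N - 1 then (i + 1) * S else L.length))).drop (i * S)

lemma pvMapRangeModify {N r : Nat} (g g' : Nat → List String)
    (f : List String → List String)
    (h1 : f (g r) = g' r) (h2 : ∀ i, i < N → i ≠ r → g i = g' i) :
    ((List.range N).map g).modify r f = (List.range N).map g' := by
  apply List.ext_getElem
  · simp
  · intro i h h'
    simp only [List.length_map, List.length_range] at h'
    rw [List.getElem_modify]
    simp only [List.getElem_map, List.getElem_range]
    by_cases hir : r = i
    · subst hir; simpa using h1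
    · simp only [hir, if_false]
      exact h2 i h' (fun h => hir h.symm)

lemma pvBucketApp_natCast (segs : List (List String)) (r : Nat) (d : String)
    (h : r < segs.length) :
    pvBucketApp segs (↑r) d = segs.modify r (fun s => s ++ [d]) := by
  unfold pvBucketApp
  have h0 : ¬ ((r : Int) < 0) := by omega
  have h1 : (0 : Int) ≤ (r : Int) ∧ (r : Int) < (segs.length : Int) := by omega
  simp [h0, h1]

lemma pvLtDivSucc (m S : Nat) (hS : 0 < S) : m < (m / S + 1) * S := by
  have h1 := Nat.div_add_mod m S
  have h2 := Nat.mod_lt m hS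
  calc m = S * (m / S) + m % S := h1.symm
    _ < S * (m / S) + S := by omega
    _ = (m / S + 1) * S := by ring

lemma pvStep (L : List String) (N S : Nat) (hS : 0 < S) (hN : 0 < N)
    (m : Nat) (hm : m < L.length) :
    ((List.range N).map (pvG L N S m)).modify (min (m / S) (N - 1)) (fun s => s ++ [L[m]]) =
      (List.range N).map (pvG L N S (m + 1)) := by
  set r := min (m / S) (N - 1) with hrdef
  have hrS : r * S ≤ m := by
    have := Nat.div_mul_le_self m S
    have : r * S ≤ m / S * S := Nat.mul_le_mul_right S (min_le_left _ _)
    omega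
  have hre : m < (if r < N - 1 then (r + 1) * S else L.length) := by
    by_cases hc : r < N - 1
    · have hr2 : r = m / S := by omega
      simp only [hc, if_true]
      rw [hr2]; exact pvLtDivSucc m S hS
    · simpa [hc] using hm
  apply pvMapRangeModify
  · -- the target bucket receives L[m]
    unfold pvG
    rw [min_eq_left (by omega), min_eq_left (by omega)]
    rw [List.take_add_one, List.getElem?_eq_getElem hm]
    rw [List.drop_append_of_le_length (by simp; omega)]
    simp
  · -- every other bucket is unchanged
    intro i hiN hir
    unfold pvG
    rcases lt_or_gt_of_ne hir with hlt | hgt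
    · -- i < r : bucket i is already full
      have hiN1 : i < N - 1 := by omega
      have he : (i + 1) * S ≤ m := by
        have : (i + 1) * S ≤ r * S := Nat.mul_le_mul_right S (by omega)
        omega
      simp only [hiN1, if_true]
      rw [min_eq_right (by omega), min_eq_right (by omega)]
    · -- r < i : bucket i has not started yet; both sides are []
      have hrm : r = m / S := by omega
      have him : m + 1 ≤ i * S := by
        have h1 : m < (r + 1) * S := by rw [hrm]; exact pvLtDivSucc m S hS
        have h2 : (r + 1) * S ≤ i * S := Nat.mul_le_mul_right S (by omega)
        omega
      rw [List.drop_eq_nil_of_le (by simp; omega), List.drop_eq_nil_of_le (by simp; omega)]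

lemma pvFoldB (L : List String) (N S : Nat) (hS : 0 < S) (hN : 0 < N) :
    ∀ (rest : List String) (m : Nat), rest = L.drop m → m ≤ L.length →
    (PySem.List.enumerate rest (m : Int)).foldl
      (fun segs jd => pvBucketApp segs (min (PySem.Int.floordiv jd.1 (S : Int)) ((N : Int) - 1)) jd.2)
      ((List.range N).map (pvG L N S m)) =
      (List.range N).map (pvG L N S L.length) := by
  intro rest
  induction rest with
  | nil =>
    intro m h hm
    have : L.length ≤ m := by
      rw [← List.drop_eq_nil_iff]; exact h.symm
    have hme : m = L.length := le_antisymm hm this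
    subst hme
    simp [PySem.List.enumerate]
  | cons d rest' ih =>
    intro m h hm
    have hmlt : m < L.length := by
      by_contra hc
      rw [List.drop_eq_nil_of_le (by omega)] at h
      exact List.cons_ne_nil d rest' h
    have hdrop : L.drop m = L[m] :: L.drop (m + 1) := List.drop_eq_getElem_cons hmlt
    rw [hdrop] at h
    obtain ⟨hd, hrest⟩ : d = L[m] ∧ rest' = L.drop (m + 1) := by
      exact ⟨(List.cons.injEq _ _ _ _ ▸ h).1, (List.cons.injEq _ _ _ _ ▸ h).2⟩
    subst hd
    rw [PySem.List.enumerate_cons, List.foldl_cons]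
    have hidx : min (PySem.Int.floordiv (m : Int) (S : Int)) ((N : Int) - 1)
        = ((min (m / S) (N - 1) : Nat) : Int) := by
      rw [PySem.Int.floordiv_natCast]
      omega
    have hrN : min (m / S) (N - 1) < N := by omega
    rw [hidx, pvBucketApp_natCast _ _ _ (by simpa using hrN),
        pvStep L N S hS hN m hmlt]
    have hcast : (m : Int) + 1 = ((m + 1 : Nat) : Int) := by push_cast; ring
    rw [hcast]
    exact ih (m + 1) hrest (by omega)

lemma pvFinal (L : List String) (N S : Nat) (hNS : N * S ≤ L.length) :
    ∀ i, i < N → pvG L N S L.length i = pvSeg L N S i := by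
  intro i hi
  unfold pvG pvSeg
  by_cases hc : i < N - 1
  · have he : (i + 1) * S ≤ L.length := by
      have : (i + 1) * S ≤ N * S := Nat.mul_le_mul_right S (by omega)
      omega
    simp only [hc, if_true]
    rw [min_eq_right he, List.drop_take]
    have hx : (i + 1) * S = i * S + S := by ring
    congr 1
    omega
  · simp only [hc, if_false]
    rw [min_self, List.take_length]
    rw [List.take_of_length_le (by simp)]

-- ===== VERDICT (by name: the statement is the Claim_ definition above) =====
theorem segment_dialogues_by_time_py_spec : Claim_equal_segment_dialogues_by_time_py := by
  intro L n _ hpre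
  unfold Pre_segment_dialogues_by_time_py at hpre
  unfold Spec_segment_dialogues_by_time_py
  unfold segment_dialogues_by_time_py segment_dialogues_by_time_py_alt
  by_cases hlt : (L.length : Int) < n
  · simp [hlt]
  · simp only [hlt, if_false]
    set N := n.toNat with hNdef
    have hn : n = (N : Int) := by omega
    have hN : 0 < N := by omega
    have hNlen : N ≤ L.length := by omega
    set S := L.length / N with hSdef
    have hS : 0 < S := Nat.div_pos hNlen hN
    have hNS : N * S ≤ L.length := by
      have := Nat.div_mul_le_self L.length N
      calc N * S = S * N := Nat.mul_comm N S
        _ = L.length / N * N := by rw [hSdef]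
        _ ≤ L.length := Nat.div_mul_le_self L.length N
    have hsz : PySem.Int.floordiv (L.length : Int) n = (S : Int) := by
      rw [hn, PySem.Int.floordiv_natCast]
    rw [hn]
    have hsz' : PySem.Int.floordiv (L.length : Int) (N : Int) = (S : Int) := by
      rw [PySem.Int.floordiv_natCast]
    rw [hsz']
    have hrange : PySem.List.pyRange 0 (N : Int) 1 = (List.range N).map (fun (k : Nat) => (k : Int)) := by
      rw [PySem.List.pyRange_one]
      have hT : ((N : Int) - 0).toNat = N := by omega
      rw [hT]
      apply List.map_congr_left
      intro a _
      omega
    -- A-side: the appended slices are exactly the segments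
    have hA : (PySem.List.pyRange 0 (N : Int) 1).foldl (fun segments i =>
        segments ++ [PySem.List.slice L (some (i * (S : Int)))
          (some (if i < (N : Int) - 1 then i * (S : Int) + (S : Int) else (L.length : Int)))]) []
        = (List.range N).map (pvSeg L N S) := by
      rw [PySem.List.foldl_append_singleton_eq_map, List.nil_append, hrange, List.map_map]
      apply List.map_congr_left
      intro k hk
      rw [List.mem_range] at hk
      simp only [Function.comp_apply]
      by_cases hc : k < N - 1
      · have hci : (k : Int) < (N : Int) - 1 := by omega
        have hcast : (k : Int) * (S : Int) = ((k * S : Nat) : Int) := by push_cast; ring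
        rw [if_pos hci, hcast, PySem.List.slice_natCast_add]
        unfold pvSeg
        rw [if_pos hc]
      · have hci : ¬ ((k : Int) < (N : Int) - 1) := by omega
        have hcast : (k : Int) * (S : Int) = ((k * S : Nat) : Int) := by push_cast; ring
        rw [if_neg hci, hcast, PySem.List.slice_natCast]
        unfold pvSeg
        rw [if_neg hc]
    -- B-side: the init buckets then the distributing fold
    have hinit : (PySem.List.pyRange 0 (N : Int) 1).map (fun _ => ([] : List String))
        = (List.range N).map (pvG L N S 0) := by
      rw [hrange, List.map_map]
      apply List.map_congr_left
      intro k hk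
      simp [pvG]
    have hB : (PySem.List.enumerate L 0).foldl (fun segs jd =>
        pvBucketApp segs (min (PySem.Int.floordiv jd.1 (S : Int)) ((N : Int) - 1)) jd.2)
        ((List.range N).map (pvG L N S 0))
        = (List.range N).map (pvG L N S L.length) := by
      have h0 : ((0 : Nat) : Int) = (0 : Int) := rfl
      rw [← h0]
      exact pvFoldB L N S hS hN L 0 (by simp) (by omega)
    simp only [hA, hinit, hB]
    exact (List.map_congr_left (fun i hi => pvFinal L N S hNS i (List.mem_range.mp hi))).symm
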